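-- pv_equiv track=rewrite | github.com/lynn-tao/AI | Crossword/Crossword Part 2/Lynn_CrosswordAI_New.py | contains_word
-- ===== SOURCE A (Python) =====
-- def contains_word(board, width, height, word_place):
--     words = []
--     for i in range(0, height):
--         word = ""
--         for j in range(0, width):
--             word += board[i*width+j]
--         if "-" not in word:
--             words.append(word)
--     for i in range(0, width):
--         word = ""
--         for j in range(0, height):
--             word += board[j*width+i]
--         if "-" not in word:
--             words.append(word)
--     return word_place in words
-- ===== SOURCE B (Python) =====
-- def contains_word(board, width, height, word_place):
--     # A word is kept only if it is dash-free; since a line equal to word_place is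
--     # dash-free iff word_place is, we can reject dash-containing targets up front
--     # and then just search for a matching line, consuming word_place cell by cell.
--     if '-' in word_place:
--         return False
--
--     def matches(cells):
--         s = word_place
--         for cell in cells:
--             if not s.startswith(cell):
--                 return False
--             s = s[len(cell):]
--         return s == ''
--
--     return any(matches([board[r * width + j] for j in range(width)])
--                for r in range(height)) \
--         or any(matches([board[j * width + c] for j in range(height)])
--                for c in range(width))
-- ===== Notes on version B (the rewrite author's own statement) =====
-- stated objective: alternative
-- what changed: Instead of constructing every dash-free row/column string and testing list membership, B rejects dash-containing targets up front (a line equal to a dash-free target is automatically dash-free) and then searches for a matching line with an early-exit prefix-consuming matcher that never builds the line strings or the word list.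
import Mathlib
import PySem

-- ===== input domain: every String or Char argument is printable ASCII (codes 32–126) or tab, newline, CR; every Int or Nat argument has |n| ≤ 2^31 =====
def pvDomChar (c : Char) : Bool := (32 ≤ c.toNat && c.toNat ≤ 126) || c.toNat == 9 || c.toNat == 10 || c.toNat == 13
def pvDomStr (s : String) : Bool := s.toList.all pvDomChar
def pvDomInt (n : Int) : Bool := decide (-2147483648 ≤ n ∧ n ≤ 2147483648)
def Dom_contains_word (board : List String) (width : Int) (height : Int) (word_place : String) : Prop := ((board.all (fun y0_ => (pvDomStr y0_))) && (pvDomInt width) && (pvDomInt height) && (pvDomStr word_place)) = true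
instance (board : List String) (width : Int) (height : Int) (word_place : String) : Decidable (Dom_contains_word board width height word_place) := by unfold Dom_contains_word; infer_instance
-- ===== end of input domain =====

-- B drops A's build-all-words-then-membership strategy: it rejects dash-containing targets up
-- front and searches for a matching line with an early-exit prefix-consuming matcher
-- (objective: alternative; same asymptotic cost).

-- ===== PORT A =====
-- strings are handled as List Char throughout (cells = board with each entry as its char list);
-- board[i*width+j] is PySem.List.pyGetD (in range under Pre_contains_word).
def contains_word (board : List String) (width : Int) (height : Int) (word_place : String) : Bool :=
  let cells := board.map String.toList
  let words1 := (PySem.List.pyRange 0 height 1).foldl (fun ws i =>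
      let word := (PySem.List.pyRange 0 width 1).foldl
        (fun w j => w ++ PySem.List.pyGetD cells (i * width + j) []) ([] : List Char)
      if !word.contains '-' then ws.push word else ws) (#[] : Array (List Char))
  let words2 := (PySem.List.pyRange 0 width 1).foldl (fun ws i =>
      let word := (PySem.List.pyRange 0 height 1).foldl
        (fun w j => w ++ PySem.List.pyGetD cells (j * width + i) []) ([] : List Char)
      if !word.contains '-' then ws.push word else ws) words1
  words2.toList.contains word_place.toList

-- ===== PORT B =====
-- Source B's helper 'matches': consume word_place cell by cell
-- (s.startswith(cell) → List.isPrefixOf, s[len(cell):] → List.drop, s == '' → List.isEmpty; exact).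
def pvMatchLine : List (List Char) → List Char → Bool
  | [], s => s.isEmpty
  | cell :: rest, s => cell.isPrefixOf s && pvMatchLine rest (s.drop cell.length)

-- literal port of Source B: early dash rejection, then any(...) or any(...) over rows and columns,
-- each line given to the matcher as its list of cells (the list comprehension).
def contains_word_alt (board : List String) (width : Int) (height : Int) (word_place : String) : Bool :=
  let wp := word_place.toList
  if wp.contains '-' then false
  else
    let cells := board.map String.toList
    ((PySem.List.pyRange 0 height 1).any (fun r =>
        pvMatchLine ((PySem.List.pyRange 0 width 1).map
          (fun j => PySem.List.pyGetD cells (r * width + j) [])) wp))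
    || ((PySem.List.pyRange 0 width 1).any (fun c =>
        pvMatchLine ((PySem.List.pyRange 0 height 1).map
          (fun j => PySem.List.pyGetD cells (j * width + c) [])) wp))

-- ===== PRECONDITION & SPEC =====
-- Pre_ excludes exactly the inputs where A raises IndexError: a positive grid larger than the board.
def Pre_contains_word (board : List String) (width : Int) (height : Int) (word_place : String) : Prop :=
  0 < width → 0 < height → width * height ≤ (board.length : Int)
instance (board : List String) (width : Int) (height : Int) (word_place : String) : Decidable (Pre_contains_word board width height word_place) := by unfold Pre_contains_word; infer_instance
def pvWitness_contains_word : List String × Int × Int × String := (["a", "b", "c", "d"], 2, 2, "ab")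

def Spec_contains_word (board : List String) (width : Int) (height : Int) (word_place : String) (out : Bool) : Prop := out = contains_word_alt board width height word_place
instance (board : List String) (width : Int) (height : Int) (word_place : String) (out : Bool) : Decidable (Spec_contains_word board width height word_place out) := by unfold Spec_contains_word; infer_instance

-- ===== CLAIM (what is proved, stated in full; the proofs are below) =====
def Claim_equal_contains_word : Prop := ∀ (board : List String) (width : Int) (height : Int) (word_place : String), Dom_contains_word board width height word_place → Pre_contains_word board width height word_place → Spec_contains_word board width height word_place (contains_word board width height word_place)

-- ===== LEMMAS AND PROOFS =====

-- A's word-collecting fold, characterised: append the dash-free words of the range.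
lemma foldl_words (l : List Int) (g : Int → List Char) (acc : Array (List Char)) :
    (l.foldl (fun ws i => if !(g i).contains '-' then ws.push (g i) else ws) acc).toList
      = acc.toList ++ (l.map g).filter (fun s => !s.contains '-') := by
  induction l generalizing acc with
  | nil => simp
  | cons x xs ih =>
    simp only [List.foldl_cons, List.map_cons, List.filter_cons, ih]
    by_cases hx : '-' ∈ g x
    · simp [hx]
    · simp [hx, Array.toList_push]

-- the matcher recognises exactly the concatenation of the cells
lemma pvMatchLine_eq (cells : List (List Char)) (s : List Char) :
    pvMatchLine cells s = (s == cells.flatten) := by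
  induction cells generalizing s with
  | nil => cases s <;> simp [pvMatchLine]
  | cons c rest ih =>
    simp only [pvMatchLine, ih, List.flatten_cons]
    by_cases h : c.isPrefixOf s
    · obtain ⟨t, rfl⟩ := List.isPrefixOf_iff_prefix.mp h
      rw [List.drop_left]
      apply Bool.eq_iff_iff.mpr
      simp [h]
    · have hne : s ≠ c ++ rest.flatten := by
        intro he
        exact h (List.isPrefixOf_iff_prefix.mpr ⟨rest.flatten, he.symm⟩)
      simp [h, hne]

-- membership in a dash-filtered word list = the dash test on the target plus a plain search
lemma contains_filter (l : List (List Char)) (wp : List Char) :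
    (l.filter (fun s => !s.contains '-')).contains wp
      = (!wp.contains '-' && l.any (fun s => wp == s)) := by
  apply Bool.eq_iff_iff.mpr
  simp only [List.contains_iff_mem, List.mem_filter, Bool.and_eq_true, List.any_eq_true,
    beq_iff_eq]
  constructor
  · rintro ⟨hm, hp⟩; exact ⟨hp, wp, hm, rfl⟩
  · rintro ⟨hp, s, hm, rfl⟩; exact ⟨hm, hp⟩

theorem contains_word_spec : Claim_equal_contains_word := by
  intro board width height wp _ _
  unfold Spec_contains_word
  simp only [contains_word, contains_word_alt]
  rw [foldl_words, foldl_words, show (#[] : Array (List Char)).toList = [] from rfl,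
      List.nil_append]
  rw [List.contains_append, contains_filter, contains_filter]
  simp only [pvMatchLine_eq, PySem.List.foldl_append_eq_flatMap, List.nil_append,
    ← List.flatMap_def]
  by_cases hd : '-' ∈ wp.toList <;> simp [hd, Function.comp_def]
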